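-- pv_equiv track=rewrite | github.com/eipiguy/adventofcode | 2021/day3/diagnostics.py | ox_filter
-- ===== SOURCE A (Python) =====
-- def ox_filter(lines, bit):
--     keep = []
--     num_zeros = 0
--     most = 1
--
--     for line in lines:
--         if line[bit] == "0":
--             num_zeros += 1
--
--     if num_zeros > (len(lines) // 2):
--         most = 0
--
--     for i, line in enumerate(lines):
--         if int(line[bit]) == most:
--             keep.append(i)
--
--     return keep
-- ===== SOURCE B (Python) =====
-- def ox_filter(lines, bit):
--     # one partitioning pass: bucket every index by its bit, then pick the majority bucket
--     zeros = []
--     ones = []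
--     for i, line in enumerate(lines):
--         d = int(line[bit])
--         if d == 0:
--             zeros.append(i)
--         elif d == 1:
--             ones.append(i)
--     return zeros if len(zeros) > len(lines) // 2 else ones
-- ===== Notes on version B (the rewrite author's own statement) =====
-- stated objective: alternative
-- what changed: A counts zeros in one pass, picks the majority bit, then rescans all lines comparing int(line[bit]) to it; B makes a single partitioning pass that buckets every index into a zeros or ones list and then returns the majority bucket with a constant-time choice.
import Mathlib
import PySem

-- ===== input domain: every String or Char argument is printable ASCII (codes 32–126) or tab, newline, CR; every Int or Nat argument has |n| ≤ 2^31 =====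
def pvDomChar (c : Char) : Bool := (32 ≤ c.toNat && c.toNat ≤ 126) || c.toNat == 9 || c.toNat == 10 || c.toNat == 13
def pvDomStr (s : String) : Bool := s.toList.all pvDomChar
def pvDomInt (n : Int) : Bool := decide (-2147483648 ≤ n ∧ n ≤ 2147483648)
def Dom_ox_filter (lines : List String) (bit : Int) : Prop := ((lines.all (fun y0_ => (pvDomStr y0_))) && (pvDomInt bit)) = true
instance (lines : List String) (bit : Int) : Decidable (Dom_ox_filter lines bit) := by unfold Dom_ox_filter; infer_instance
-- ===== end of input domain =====

-- B replaces A's count-then-rescan (two passes over the lines) by one partitioning pass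
-- that buckets indices into zeros/ones, plus a constant-time majority choice (objective: alternative).


-- ===== PORT A =====
def ox_filter (lines : List String) (bit : Int) : List Int :=
  let num_zeros : Int :=
    lines.foldl (fun n line => if PySem.Str.pyGet? line bit = some '0' then n + 1 else n) 0
  let most : Int := if num_zeros > PySem.Int.floordiv (PySem.List.len lines) 2 then 0 else 1
  (PySem.List.enumerate lines).foldl
    (fun keep p =>
      if (PySem.Str.pyGet? p.2 bit).bind (fun c => PySem.Int.ofChars? [c]) = some most
      then keep ++ [p.1] else keep) []

-- ===== PORT B =====
def ox_filter_alt (lines : List String) (bit : Int) : List Int :=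
  let zo :=
    (PySem.List.enumerate lines).foldl
      (fun (acc : List Int × List Int) p =>
        let d := (PySem.Str.pyGet? p.2 bit).bind (fun c => PySem.Int.ofChars? [c])
        if d = some 0 then (acc.1 ++ [p.1], acc.2)
        else if d = some 1 then (acc.1, acc.2 ++ [p.1])
        else acc) ([], [])
  if PySem.List.len zo.1 > PySem.Int.floordiv (PySem.List.len lines) 2 then zo.1 else zo.2

-- ===== PRECONDITION & SPEC =====
-- Pre_: bit is a valid Python index into every line and that character is a decimal digit;
-- otherwise A raises IndexError (line[bit]) or ValueError (int(line[bit])).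
def Pre_ox_filter (lines : List String) (bit : Int) : Prop :=
  ∀ line ∈ lines, (PySem.Str.pyGet? line bit).any PySem.Chars.isdigit = true
instance (lines : List String) (bit : Int) : Decidable (Pre_ox_filter lines bit) := by
  unfold Pre_ox_filter; infer_instance
def pvWitness_ox_filter : List String × Int := (["01", "10", "11"], 0)
def Spec_ox_filter (lines : List String) (bit : Int) (out : List Int) : Prop := out = ox_filter_alt lines bit
instance (lines : List String) (bit : Int) (out : List Int) : Decidable (Spec_ox_filter lines bit out) := by unfold Spec_ox_filter; infer_instance

-- ===== CLAIM (what is proved, stated in full; the proofs are below) =====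
def Claim_equal_ox_filter : Prop := ∀ (lines : List String) (bit : Int), Dom_ox_filter lines bit → Pre_ox_filter lines bit → Spec_ox_filter lines bit (ox_filter lines bit)

-- ===== LEMMAS AND PROOFS =====

theorem digit_char_cases (c : Char) (h : PySem.Chars.isdigit c = true) :
    c = '0' ∨ c = '1' ∨ c = '2' ∨ c = '3' ∨ c = '4' ∨ c = '5' ∨ c = '6' ∨ c = '7' ∨ c = '8' ∨ c = '9' := by
  rw [PySem.Chars.isdigit, Bool.and_eq_true, decide_eq_true_iff, decide_eq_true_iff,
      Char.le_def, Char.le_def] at h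
  obtain ⟨h1, h2⟩ := h
  have hlo : 48 ≤ c.toNat := by exact_mod_cast h1
  have hhi : c.toNat ≤ 57 := by exact_mod_cast h2
  have hc := Char.ofNat_toNat c
  interval_cases h' : c.toNat <;> subst hc <;> decide

theorem ofChars_digit_zero (c : Char) (h : PySem.Chars.isdigit c = true) :
    (PySem.Int.ofChars? [c] = some 0) ↔ c = '0' := by
  rcases digit_char_cases c h with rfl|rfl|rfl|rfl|rfl|rfl|rfl|rfl|rfl|rfl <;> decide

theorem foldA_filter (P : Int × String → Prop) [DecidablePred P]
    (l : List (Int × String)) (acc : List Int) :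
    l.foldl (fun keep p => if P p then keep ++ [p.1] else keep) acc
      = acc ++ (l.filter (fun p => decide (P p))).map (·.1) := by
  induction l generalizing acc with
  | nil => simp
  | cons a l ih =>
    by_cases h : P a <;> simp [List.foldl_cons, h, ih]

theorem foldB_filter (bit : Int) (l : List (Int × String)) (z o : List Int) :
    l.foldl
      (fun (acc : List Int × List Int) p =>
        if (PySem.Str.pyGet? p.2 bit).bind (fun c => PySem.Int.ofChars? [c]) = some 0 then (acc.1 ++ [p.1], acc.2)
        else if (PySem.Str.pyGet? p.2 bit).bind (fun c => PySem.Int.ofChars? [c]) = some 1 then (acc.1, acc.2 ++ [p.1])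
        else acc) (z, o)
      = (z ++ (l.filter (fun p => decide ((PySem.Str.pyGet? p.2 bit).bind (fun c => PySem.Int.ofChars? [c]) = some 0))).map (·.1),
         o ++ (l.filter (fun p => decide ((PySem.Str.pyGet? p.2 bit).bind (fun c => PySem.Int.ofChars? [c]) = some 1))).map (·.1)) := by
  induction l generalizing z o with
  | nil => simp
  | cons a l ih =>
    rw [List.foldl_cons]
    by_cases h0 : (PySem.Str.pyGet? a.2 bit).bind (fun c => PySem.Int.ofChars? [c]) = some 0
    · rw [if_pos h0, ih]
      simp only [List.filter_cons, h0]
      simp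
    · rw [if_neg h0]
      have d0 : decide ((PySem.Str.pyGet? a.2 bit).bind (fun c => PySem.Int.ofChars? [c]) = some 0) = false :=
        decide_eq_false h0
      by_cases h1 : (PySem.Str.pyGet? a.2 bit).bind (fun c => PySem.Int.ofChars? [c]) = some 1
      · rw [if_pos h1, ih]
        simp only [List.filter_cons, h1]
        simp
      · rw [if_neg h1, ih]
        have d1 : decide ((PySem.Str.pyGet? a.2 bit).bind (fun c => PySem.Int.ofChars? [c]) = some 1) = false :=
          decide_eq_false h1
        simp only [List.filter_cons, d0, d1]
        simp

theorem foldA_count (P : String → Prop) [DecidablePred P] (l : List String) (k : Int) :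
    l.foldl (fun n line => if P line then n + 1 else n) k
      = k + ((l.filter (fun line => decide (P line))).length : Int) := by
  induction l generalizing k with
  | nil => simp
  | cons a l ih =>
    by_cases h : P a <;> simp [List.foldl_cons, h, ih]; ring

theorem filter_enumerate_length (P : String → Bool) (xs : List String) (s : Int) :
    ((PySem.List.enumerate xs s).filter (fun p => P p.2)).length
      = (xs.filter P).length := by
  induction xs generalizing s with
  | nil => simp [PySem.List.enumerate_nil]
  | cons a xs ih =>
    by_cases h : P a <;>
      simp [PySem.List.enumerate_cons, h, ih]

-- ===== VERDICT (by name: the statement is the Claim_ definition above) =====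
theorem ox_filter_spec : Claim_equal_ox_filter := by
  intro lines bit _hdom hpre
  unfold Spec_ox_filter ox_filter ox_filter_alt
  have hpt : ∀ line ∈ lines, ∃ c, PySem.Str.pyGet? line bit = some c ∧ PySem.Chars.isdigit c = true := by
    intro line hl
    have := hpre line hl
    cases hg : PySem.Str.pyGet? line bit with
    | none => rw [hg] at this; simp [Option.any] at this
    | some c => rw [hg] at this; exact ⟨c, rfl, by simpa [Option.any] using this⟩
  have hzero : ∀ line ∈ lines,
      (PySem.Str.pyGet? line bit = some '0')
        ↔ ((PySem.Str.pyGet? line bit).bind (fun c => PySem.Int.ofChars? [c]) = some 0) := by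
    intro line hl
    obtain ⟨c, hg, hd⟩ := hpt line hl
    rw [hg]; simp only [Option.bind_some, Option.some_inj]
    rw [ofChars_digit_zero c hd]
  simp only [foldA_count, foldB_filter bit, zero_add, List.nil_append]
  -- the zero-count of A equals the length of B's zeros bucket
  have hcount :
      ((lines.filter (fun line => decide (PySem.Str.pyGet? line bit = some '0'))).length : Int)
        = (((PySem.List.enumerate lines).filter
            (fun p => decide ((PySem.Str.pyGet? p.2 bit).bind (fun c => PySem.Int.ofChars? [c]) = some 0))).length : Int) := by
    rw [filter_enumerate_length
          (fun line => decide ((PySem.Str.pyGet? line bit).bind (fun c => PySem.Int.ofChars? [c]) = some 0)) lines 0]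
    congr 1
    refine congrArg List.length (List.filter_congr ?_)
    intro line hl
    simp only [decide_eq_decide]
    exact hzero line hl
  rw [hcount]
  simp only [PySem.List.len_eq, List.length_map]
  by_cases hmaj :
      ((((PySem.List.enumerate lines).filter
          (fun p => decide ((PySem.Str.pyGet? p.2 bit).bind (fun c => PySem.Int.ofChars? [c]) = some 0))).length : Int))
        > PySem.Int.floordiv (lines.length : Int) 2
  · simp only [if_pos hmaj]
    rw [foldA_filter, List.nil_append]
  · simp only [if_neg hmaj]
    rw [foldA_filter, List.nil_append]
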